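-- pv_equiv track=rewrite | github.com/Aryeah86/Multi-Renamer | wing_snap_wav_renamer.py | _lane_to_logical_index
-- ===== SOURCE A (Python) =====
-- from typing import Any
--
-- def _numeric_nodes(container: Any) -> list[tuple[int, dict[str, Any]]]:
--     if not isinstance(container, dict):
--         return []
--     nodes: list[tuple[int, dict[str, Any]]] = []
--     for key, value in container.items():
--         if not key.isdigit() or not isinstance(value, dict):
--             continue
--         nodes.append((int(key), value))
--     nodes.sort(key=lambda item: item[0])
--     return nodes
--
-- def _lane_to_logical_index(container: Any, lane_index: int) -> tuple[int | None, str]: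
--     """Map lane-based route index to a logical source index and stereo side label."""
--     if lane_index < 1:
--         return None, ""
--
--     nodes = _numeric_nodes(container)
--     if not nodes:
--         return None, ""
--
--     # Groups with busmono expose one logical node per bus, but routing indices
--     # can be lane-based (L/R) for stereo buses.
--     if all("busmono" in node for _idx, node in nodes):
--         lane_cursor = 0
--         for logical_idx, node in nodes:
--             width = 1 if bool(node.get("busmono")) else 2
--             lane_start = lane_cursor + 1
--             lane_end = lane_cursor + width
--             lane_cursor = lane_end
--             if lane_start <= lane_index <= lane_end:
--                 if width == 2:
--                     side = "L" if lane_index == lane_start else "R"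
--                     return logical_idx, side
--                 return logical_idx, ""
--         return None, ""
--
--     # Some groups use direct logical indexing (one entry per route index).
--     return lane_index, ""
-- ===== SOURCE B (Python) =====
-- from typing import Any
--
-- def _numeric_nodes(container: Any) -> list[tuple[int, dict[str, Any]]]:
--     if not isinstance(container, dict):
--         return []
--     nodes: list[tuple[int, dict[str, Any]]] = []
--     for key, value in container.items():
--         if not key.isdigit() or not isinstance(value, dict):
--             continue
--         nodes.append((int(key), value))
--     nodes.sort(key=lambda item: item[0])
--     return nodes
--
-- def _lane_to_logical_index(container: Any, lane_index: int) -> tuple[int | None, str]: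
--     """Map lane-based route index to a logical source index and stereo side label."""
--     if lane_index < 1:
--         return None, ""
--
--     nodes = _numeric_nodes(container)
--     if not nodes:
--         return None, ""
--
--     if all("busmono" in node for _idx, node in nodes):
--         # Expand every node into its physical lanes once, then just index.
--         lanes = [(logical_idx, side)
--                  for logical_idx, node in nodes
--                  for side in ([""] if node.get("busmono") else ["L", "R"])]
--         k = lane_index - 1
--         if k < len(lanes):
--             logical_idx, side = lanes[k]
--             return logical_idx, side
--         return None, ""
--
--     return lane_index, ""
-- ===== Notes on version B (the rewrite author's own statement) =====
-- stated objective: simpler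
-- what changed: Replaces the running-cursor scan with early return by a flat expansion list (one (logical_idx, side) entry per physical lane, built with a comprehension) followed by a single bounds-checked index at lane_index - 1.
import Mathlib
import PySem

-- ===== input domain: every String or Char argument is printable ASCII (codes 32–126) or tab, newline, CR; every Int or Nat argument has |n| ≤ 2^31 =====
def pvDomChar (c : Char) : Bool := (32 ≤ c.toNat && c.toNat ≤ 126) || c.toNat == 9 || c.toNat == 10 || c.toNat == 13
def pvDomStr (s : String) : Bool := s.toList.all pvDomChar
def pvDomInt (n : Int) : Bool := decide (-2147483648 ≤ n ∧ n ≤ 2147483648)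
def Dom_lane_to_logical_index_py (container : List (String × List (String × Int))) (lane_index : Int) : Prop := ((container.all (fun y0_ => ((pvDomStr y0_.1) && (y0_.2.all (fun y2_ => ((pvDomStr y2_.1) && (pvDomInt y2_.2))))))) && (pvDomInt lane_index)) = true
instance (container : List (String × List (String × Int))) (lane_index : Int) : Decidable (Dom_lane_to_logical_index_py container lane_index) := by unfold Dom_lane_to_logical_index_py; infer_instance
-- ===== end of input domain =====

-- B replaces A's running-cursor scan by a flat lane-expansion list indexed once at lane_index - 1 (objective: simpler).

-- ===== shared helpers (the Python helper _numeric_nodes, identical in Source A and Source B) =====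
-- Python truthiness of node.get("busmono") : Option Int (None and 0 are falsy) — exact on Option Int
def pyTruthy (o : Option Int) : Bool :=
  match o with
  | some v => v != 0
  | none => false

-- _numeric_nodes: keys that are all digits, as (int(key), value-dict), sorted by the int key (stable).
-- (int(key).getD 0 is exact here: strIsdigit guarantees int(key) parses.)
def numericNodes (container : List (String × List (String × Int))) :
    List (Int × PySem.Dict String Int) :=
  let d : PySem.Dict String (List (String × Int)) := PySem.Dict.ofList container
  let nodes := d.items.foldl
    (fun acc kv =>
      if PySem.Str.strIsdigit kv.1 then
        acc ++ [(((PySem.Int.ofStr? kv.1).getD 0), PySem.Dict.ofList kv.2)]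
      else acc) []
  PySem.List.sorted nodes (fun p => p.1)

-- ===== PORT A =====
-- A's for-loop over nodes carrying lane_cursor, with early return inside the loop
def laneScan (lane_index : Int) :
    List (Int × PySem.Dict String Int) → Int → Option Int × String
  | [], _ => (none, "")
  | (logical_idx, node) :: rest, lane_cursor =>
    let width : Int := if pyTruthy (node.get? "busmono") then 1 else 2
    let lane_start := lane_cursor + 1
    let lane_end := lane_cursor + width
    if lane_start ≤ lane_index ∧ lane_index ≤ lane_end then
      if width = 2 then
        (some logical_idx, if lane_index = lane_start then "L" else "R")
      else (some logical_idx, "")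
    else laneScan lane_index rest lane_end

def lane_to_logical_index_py (container : List (String × List (String × Int))) (lane_index : Int) : Option Int × String :=
  if lane_index < 1 then (none, "")
  else
    let nodes := numericNodes container
    if nodes = [] then (none, "")
    else if nodes.all (fun p => p.2.contains "busmono") then
      laneScan lane_index nodes 0
    else (some lane_index, "")

-- ===== PORT B =====
-- the comprehension: one (logical_idx, side) entry per physical lane
def expandLanes (nodes : List (Int × PySem.Dict String Int)) : List (Int × String) :=
  nodes.flatMap (fun p =>
    if pyTruthy (p.2.get? "busmono") then [(p.1, "")] else [(p.1, "L"), (p.1, "R")])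

def lane_to_logical_index_py_alt (container : List (String × List (String × Int))) (lane_index : Int) : Option Int × String :=
  if lane_index < 1 then (none, "")
  else
    let nodes := numericNodes container
    if nodes = [] then (none, "")
    else if nodes.all (fun p => p.2.contains "busmono") then
      -- k = lane_index - 1 ≥ 0 here, so 'if k < len(lanes): lanes[k] else (None, "")' is exactly pyGet?
      match PySem.List.pyGet? (expandLanes nodes) (lane_index - 1) with
      | some ls => (some ls.1, ls.2)
      | none => (none, "")
    else (some lane_index, "")

-- ===== PRECONDITION & SPEC =====
def Spec_lane_to_logical_index_py (container : List (String × List (String × Int))) (lane_index : Int) (out : Option Int × String) : Prop := out = lane_to_logical_index_py_alt container lane_index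
instance (container : List (String × List (String × Int))) (lane_index : Int) (out : Option Int × String) : Decidable (Spec_lane_to_logical_index_py container lane_index out) := by unfold Spec_lane_to_logical_index_py; infer_instance

-- ===== CLAIM (what is proved, stated in full; the proofs are below) =====
def Claim_equal_lane_to_logical_index_py : Prop := ∀ (container : List (String × List (String × Int))) (lane_index : Int), Dom_lane_to_logical_index_py container lane_index → Spec_lane_to_logical_index_py container lane_index (lane_to_logical_index_py container lane_index)

-- ===== LEMMAS AND PROOFS =====

-- A's cursor scan, started at cursor 'cur', is B's expansion list indexed at lane_index - cur - 1.
lemma laneScan_eq_expand (L : Int) (nodes : List (Int × PySem.Dict String Int)) :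
    ∀ cur : Int, cur + 1 ≤ L →
      laneScan L nodes cur =
        (match PySem.List.pyGet? (expandLanes nodes) (L - cur - 1) with
         | some ls => (some ls.1, ls.2)
         | none => (none, "")) := by
  induction nodes with
  | nil => intro cur _; simp [laneScan, expandLanes, PySem.List.pyGet?, PySem.List.pyIdx?]
  | cons hd rest ih =>
    intro cur hcur
    obtain ⟨li, node⟩ := hd
    by_cases hb : pyTruthy (node.get? "busmono")
    · -- width 1
      simp only [laneScan, expandLanes, List.flatMap_cons, hb, if_true, List.singleton_append]
      by_cases h1 : L = cur + 1
      · rw [show L - cur - 1 = (((0 : Nat)) : Int) by omega, PySem.List.pyGet?_natCast]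
        simp [h1]
      · have hne : ¬ (cur + 1 ≤ L ∧ L ≤ cur + 1) := by omega
        have hcast : L - (cur + 1) - 1 = (((L - (cur + 1) - 1).toNat : Nat) : Int) := by omega
        rw [if_neg hne, show L - cur - 1 = (((L - (cur + 1) - 1).toNat : Nat) : Int) + 1 by omega,
          PySem.List.pyGet?_cons_succ, ← hcast, ih (cur + 1) (by omega)]
        simp [expandLanes]
    · -- width 2
      rw [Bool.not_eq_true] at hb
      simp only [laneScan, expandLanes, List.flatMap_cons, hb, Bool.false_eq_true, if_false,
        List.cons_append]
      by_cases h1 : L = cur + 1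
      · rw [show L - cur - 1 = (((0 : Nat)) : Int) by omega, PySem.List.pyGet?_natCast]
        simp [h1]
      · by_cases h2 : L = cur + 2
        · rw [show L - cur - 1 = (((0 : Nat)) : Int) + 1 by omega,
            PySem.List.pyGet?_cons_succ, PySem.List.pyGet?_natCast]
          have hc : cur + 1 ≤ L ∧ L ≤ cur + 2 := by omega
          simp [hc, h1]
        · have hne : ¬ (cur + 1 ≤ L ∧ L ≤ cur + 2) := by omega
          have hcast : L - (cur + 2) - 1 = (((L - (cur + 2) - 1).toNat : Nat) : Int) := by omega
          rw [if_neg hne,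
            show L - cur - 1 = ((((L - (cur + 2) - 1).toNat : Nat) : Int) + 1) + 1 by omega,
            show ((((L - (cur + 2) - 1).toNat : Nat) : Int) + 1) + 1
              = ((((L - (cur + 2) - 1).toNat + 1 : Nat) : Int)) + 1 by push_cast; ring,
            PySem.List.pyGet?_cons_succ,
            show (((L - (cur + 2) - 1).toNat + 1 : Nat) : Int)
              = (((L - (cur + 2) - 1).toNat : Nat) : Int) + 1 by push_cast; ring,
            PySem.List.pyGet?_cons_succ, ← hcast, ih (cur + 2) (by omega)]
          simp [expandLanes]

-- ===== VERDICT (by name: the statement is the Claim_ definition above) =====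
theorem lane_to_logical_index_py_spec : Claim_equal_lane_to_logical_index_py := by
  intro container lane_index _
  unfold Spec_lane_to_logical_index_py lane_to_logical_index_py lane_to_logical_index_py_alt
  by_cases hlt : lane_index < 1
  · simp [hlt]
  · simp only [if_neg hlt]
    by_cases hnil : numericNodes container = []
    · simp [hnil]
    · simp only [if_neg hnil]
      by_cases hall : (numericNodes container).all (fun p => p.2.contains "busmono")
      · simp only [hall, if_true]
        rw [laneScan_eq_expand lane_index (numericNodes container) 0 (by omega)]
        norm_num
      · simp [hall]
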